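-- pv_equiv track=rewrite | github.com/flabby1976/AoC-2020 | day24/day24-1.py | tile_from_route
-- ===== SOURCE A (Python) =====
-- def tile_from_route(r):
--     x=0
--     y=0
--     for s in r:
--         if s == 'e':
--             x += 2
--         if s == 'w':
--             x -= 2
--         if s == 'ne':
--             x += 1
--             y += 1
--         if s == 'nw':
--             x -= 1
--             y += 1
--         if s == 'se':
--             x += 1
--             y -= 1
--         if s == 'sw':
--             x -= 1
--             y -= 1
--
--     return (x,y)
-- ===== SOURCE B (Python) =====
-- from collections import Counter
--
-- def tile_from_route(r):
--     c = Counter(r)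
--     x = 2*c['e'] - 2*c['w'] + c['ne'] - c['nw'] + c['se'] - c['sw']
--     y = c['ne'] + c['nw'] - c['se'] - c['sw']
--     return (x, y)
-- ===== Notes on version B (the rewrite author's own statement) =====
-- stated objective: alternative
-- what changed: Replaces per-token branching accumulation with a Counter tally built in one pass followed by a fixed closed-form arithmetic combination of the six direction counts.
import Mathlib
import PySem

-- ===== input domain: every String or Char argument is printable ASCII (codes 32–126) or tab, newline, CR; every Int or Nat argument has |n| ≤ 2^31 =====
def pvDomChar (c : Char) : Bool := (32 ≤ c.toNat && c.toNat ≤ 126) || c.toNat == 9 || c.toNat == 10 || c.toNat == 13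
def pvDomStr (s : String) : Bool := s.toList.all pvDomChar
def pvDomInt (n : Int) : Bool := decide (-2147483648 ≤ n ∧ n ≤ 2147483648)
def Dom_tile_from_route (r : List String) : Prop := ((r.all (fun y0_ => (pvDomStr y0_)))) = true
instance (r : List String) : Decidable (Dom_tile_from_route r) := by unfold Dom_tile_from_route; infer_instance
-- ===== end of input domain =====

-- B replaces A's per-token branching accumulation with a Counter tally plus one closed-form combination of the six direction counts (alternative decomposition, same cost).


-- ===== PORT A =====
def tileStepA (p : Int × Int) (s : String) : Int × Int :=
  let x := p.1
  let y := p.2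
  let x := if s == "e" then x + 2 else x
  let x := if s == "w" then x - 2 else x
  let (x, y) := if s == "ne" then (x + 1, y + 1) else (x, y)
  let (x, y) := if s == "nw" then (x - 1, y + 1) else (x, y)
  let (x, y) := if s == "se" then (x + 1, y - 1) else (x, y)
  let (x, y) := if s == "sw" then (x - 1, y - 1) else (x, y)
  (x, y)

def tile_from_route (r : List String) : Int × Int :=
  r.foldl tileStepA (0, 0)

-- ===== PORT B =====
def tile_from_route_alt (r : List String) : Int × Int :=
  let c := PySem.Dict.counter r
  (2 * c.getD "e" 0 - 2 * c.getD "w" 0 + c.getD "ne" 0 - c.getD "nw" 0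
     + c.getD "se" 0 - c.getD "sw" 0,
   c.getD "ne" 0 + c.getD "nw" 0 - c.getD "se" 0 - c.getD "sw" 0)

-- ===== PRECONDITION & SPEC =====
def Spec_tile_from_route (r : List String) (out : Int × Int) : Prop := out = tile_from_route_alt r
instance (r : List String) (out : Int × Int) : Decidable (Spec_tile_from_route r out) := by unfold Spec_tile_from_route; infer_instance

-- ===== CLAIM (what is proved, stated in full; the proofs are below) =====
def Claim_equal_tile_from_route : Prop := ∀ (r : List String), Dom_tile_from_route r → Spec_tile_from_route r (tile_from_route r)

-- ===== LEMMAS AND PROOFS =====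
theorem tile_foldA (r : List String) : ∀ (x y : Int),
    r.foldl tileStepA (x, y)
      = (x + 2 * (r.count "e" : Int) - 2 * r.count "w" + r.count "ne" - r.count "nw"
           + r.count "se" - r.count "sw",
         y + (r.count "ne" : Int) + r.count "nw" - r.count "se" - r.count "sw") := by
  induction r with
  | nil => intro x y; simp
  | cons s t ih =>
    intro x y
    simp only [List.foldl_cons, List.count_cons, tileStepA]
    by_cases he : s = "e" <;> by_cases hw : s = "w" <;> by_cases hne : s = "ne" <;>
      by_cases hnw : s = "nw" <;> by_cases hse : s = "se" <;> by_cases hsw : s = "sw" <;>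
      simp_all [ih] <;> push_cast <;> ring_nf <;> try exact ⟨trivial, trivial⟩

theorem tile_from_route_equal (r : List String) :
    tile_from_route r = tile_from_route_alt r := by
  simp only [tile_from_route, tile_from_route_alt, PySem.Dict.getD_counter, tile_foldA r 0 0]
  push_cast
  ring_nf

-- ===== VERDICT (by name: the statement is the Claim_ definition above) =====
theorem tile_from_route_spec : Claim_equal_tile_from_route := by
  intro r _
  exact tile_from_route_equal r
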